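-- pv_equiv track=rewrite | github.com/NathanBrownBennett/DisplayPlacerEasyMode | EasySetup.py | parse_displayplacer_output
-- ===== SOURCE A (Python) =====
-- def parse_displayplacer_output(result):
--     displays = []
--     display = {}  # Initialize the dictionary outside the loop
--     for line in result.splitlines():
--         if "Persistent screen id:" in line:
--             if display:  # Check if the display dictionary is not empty
--                 displays.append(display)  # Append the previous display before starting a new one
--             display = {'Persistent screen id': line.split(": ")[1]}  # Start a new display dictionary
--         elif "Contextual screen id:" in line:
--             display['Contextual screen id'] = line.split(": ")[1]
--         elif "Serial screen id:" in line:
--             display['Serial screen id'] = line.split(": ")[1]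
--         elif "Type:" in line:
--             display['Type'] = line.split(": ")[1]
--         elif "Resolution:" in line:
--             display['Resolution'] = line.split(": ")[1]
--         elif "Hertz:" in line:
--             display['Hertz'] = line.split(": ")[1]
--         elif "Color Depth:" in line:
--             display['Color Depth'] = line.split(": ")[1]
--         elif "Scaling:" in line:
--             display['Scaling'] = line.split(": ")[1]
--         elif "Origin:" in line:
--             display['Origin'] = line.split(": ")[1]
--         elif "Rotation:" in line:
--             display['Rotation'] = line.split(": ")[1]
--             # No need to assume Rotation is the last item anymore
--     if display:  # Check and append the last display dictionary if not empty
--         displays.append(display)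
--     return displays
-- ===== SOURCE B (Python) =====
-- MARKERS = [
--     ("Persistent screen id:", "Persistent screen id"),
--     ("Contextual screen id:", "Contextual screen id"),
--     ("Serial screen id:", "Serial screen id"),
--     ("Type:", "Type"),
--     ("Resolution:", "Resolution"),
--     ("Hertz:", "Hertz"),
--     ("Color Depth:", "Color Depth"),
--     ("Scaling:", "Scaling"),
--     ("Origin:", "Origin"),
--     ("Rotation:", "Rotation"),
-- ]
--
--
-- def parse_displayplacer_output(result):
--     # Phase 1: partition the lines into blocks, one per "Persistent screen id:" marker,
--     # keeping whatever precedes the first marker as a leading block.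
--     blocks = []
--     current = []
--     for line in result.splitlines():
--         if "Persistent screen id:" in line:
--             blocks.append(current)
--             current = [line]
--         else:
--             current.append(line)
--     blocks.append(current)
--     # Phase 2: map each block to a dict via the ordered marker table (first match wins).
--     displays = []
--     for block in blocks:
--         display = {}
--         for line in block:
--             for marker, key in MARKERS:
--                 if marker in line:
--                     display[key] = line.split(": ")[1]
--                     break
--         if display:
--             displays.append(display)
--     return displays
-- ===== Notes on version B (the rewrite author's own statement) =====
-- stated objective: alternative
-- what changed: A's single stateful loop with a ten-branch elif chain is replaced by a two-phase group-then-map: one pass partitions the lines into blocks at each 'Persistent screen id:' marker (keeping a leading orphan block), then each block is mapped to a dict through an ordered marker-to-key table; empty blocks are dropped.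
import Mathlib
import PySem

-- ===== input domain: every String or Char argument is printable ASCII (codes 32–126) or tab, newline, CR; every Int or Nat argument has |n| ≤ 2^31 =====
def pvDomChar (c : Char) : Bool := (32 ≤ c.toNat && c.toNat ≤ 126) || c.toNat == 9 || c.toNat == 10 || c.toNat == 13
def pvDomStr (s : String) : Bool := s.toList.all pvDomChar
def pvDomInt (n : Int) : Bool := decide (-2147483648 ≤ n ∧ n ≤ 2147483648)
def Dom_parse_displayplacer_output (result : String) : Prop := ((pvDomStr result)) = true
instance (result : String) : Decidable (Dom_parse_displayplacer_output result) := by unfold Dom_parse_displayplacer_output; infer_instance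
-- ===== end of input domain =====

-- B replaces A's single stateful elif-chain loop by a two-phase group-then-map over marker blocks (objective: alternative decomposition, same cost).


-- ===== PORT A =====
-- line.split(": ")[1]; none is exactly where Python raises IndexError (excluded by Pre_)
def aVal (line : String) : Option String :=
  (PySem.Str.split? line ": ").bind (fun parts => PySem.List.pyGet? parts 1)

-- display[key] = line.split(": ")[1]; on none Python raises (outside Pre_), the port leaves the dict unchanged
def aSet (d : PySem.Dict String String) (key line : String) : PySem.Dict String String :=
  match aVal line with
  | some v => d.insert key v
  | none => d

def aStep (st : List (PySem.Dict String String) × PySem.Dict String String) (line : String) :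
    List (PySem.Dict String String) × PySem.Dict String String :=
  if PySem.Str.isIn "Persistent screen id:" line then
    ((if st.2.size ≠ 0 then st.1 ++ [st.2] else st.1),
     aSet PySem.Dict.empty "Persistent screen id" line)
  else if PySem.Str.isIn "Contextual screen id:" line then (st.1, aSet st.2 "Contextual screen id" line)
  else if PySem.Str.isIn "Serial screen id:" line then (st.1, aSet st.2 "Serial screen id" line)
  else if PySem.Str.isIn "Type:" line then (st.1, aSet st.2 "Type" line)
  else if PySem.Str.isIn "Resolution:" line then (st.1, aSet st.2 "Resolution" line)
  else if PySem.Str.isIn "Hertz:" line then (st.1, aSet st.2 "Hertz" line)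
  else if PySem.Str.isIn "Color Depth:" line then (st.1, aSet st.2 "Color Depth" line)
  else if PySem.Str.isIn "Scaling:" line then (st.1, aSet st.2 "Scaling" line)
  else if PySem.Str.isIn "Origin:" line then (st.1, aSet st.2 "Origin" line)
  else if PySem.Str.isIn "Rotation:" line then (st.1, aSet st.2 "Rotation" line)
  else st

-- the final 'if display: displays.append(display)' plus the return
def aFinish (st : List (PySem.Dict String String) × PySem.Dict String String) :
    List (List (String × String)) :=
  (if st.2.size ≠ 0 then st.1 ++ [st.2] else st.1).map PySem.Dict.items

def parse_displayplacer_output (result : String) : List (List (String × String)) :=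
  aFinish ((PySem.Str.splitlines result).foldl aStep ([], PySem.Dict.empty))

-- ===== PORT B =====
def bMarkers : List (String × String) :=
  [("Persistent screen id:", "Persistent screen id"),
   ("Contextual screen id:", "Contextual screen id"),
   ("Serial screen id:", "Serial screen id"),
   ("Type:", "Type"),
   ("Resolution:", "Resolution"),
   ("Hertz:", "Hertz"),
   ("Color Depth:", "Color Depth"),
   ("Scaling:", "Scaling"),
   ("Origin:", "Origin"),
   ("Rotation:", "Rotation")]

-- display[key] = line.split(": ")[1]; on none Python raises (outside Pre_), the port leaves the dict unchanged
def bSet (d : PySem.Dict String String) (key line : String) : PySem.Dict String String :=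
  match (PySem.Str.split? line ": ").bind (fun parts => PySem.List.pyGet? parts 1) with
  | some v => d.insert key v
  | none => d

-- the inner 'for marker, key in MARKERS: if marker in line: …; break' loop
def bApply : List (String × String) → PySem.Dict String String → String → PySem.Dict String String
  | [], d, _ => d
  | (m, k) :: rest, d, line =>
    if PySem.Str.isIn m line then bSet d k line else bApply rest d line

-- phase 1 loop body: start a new block at each Persistent marker
def bSplitStep (st : List (List String) × List String) (line : String) :
    List (List String) × List String :=
  if PySem.Str.isIn "Persistent screen id:" line then (st.1 ++ [st.2], [line])
  else (st.1, st.2 ++ [line])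

-- phase 2: a block's dict
def bDict (block : List String) : PySem.Dict String String :=
  block.foldl (fun d line => bApply bMarkers d line) PySem.Dict.empty

-- phase 2 outer loop: keep the non-empty dicts
def bEmit (blocks : List (List String)) : List (PySem.Dict String String) :=
  blocks.foldl (fun acc b => if (bDict b).size ≠ 0 then acc ++ [bDict b] else acc) []

-- 'blocks.append(current)' after phase 1
def bBlocks (st : List (List String) × List String) : List (List String) := st.1 ++ [st.2]

def parse_displayplacer_output_alt (result : String) : List (List (String × String)) :=
  (bEmit (bBlocks ((PySem.Str.splitlines result).foldl bSplitStep ([], [])))).map PySem.Dict.items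

-- ===== PRECONDITION & SPEC =====
def pvPreMarkers : List String :=
  ["Persistent screen id:", "Contextual screen id:", "Serial screen id:", "Type:", "Resolution:",
   "Hertz:", "Color Depth:", "Scaling:", "Origin:", "Rotation:"]

-- Pre_ excludes exactly the inputs where A raises IndexError: a line containing one of the
-- markers but not the separator ": " makes line.split(": ")[1] fail (B raises there too).
def Pre_parse_displayplacer_output (result : String) : Prop :=
  ∀ line ∈ PySem.Str.splitlines result,
    pvPreMarkers.any (fun m => PySem.Str.isIn m line) = true → PySem.Str.isIn ": " line = true
instance (result : String) : Decidable (Pre_parse_displayplacer_output result) := by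
  unfold Pre_parse_displayplacer_output; infer_instance

def pvWitness_parse_displayplacer_output : String :=
  "Persistent screen id: AAA-1\nType: LCD\nRotation: 90"

def Spec_parse_displayplacer_output (result : String) (out : List (List (String × String))) : Prop :=
  out = parse_displayplacer_output_alt result
instance (result : String) (out : List (List (String × String))) :
    Decidable (Spec_parse_displayplacer_output result out) := by
  unfold Spec_parse_displayplacer_output; infer_instance

-- ===== CLAIM =====
def Claim_equal_parse_displayplacer_output : Prop :=
  ∀ (result : String), Dom_parse_displayplacer_output result →
    Pre_parse_displayplacer_output result →
    Spec_parse_displayplacer_output result (parse_displayplacer_output result)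

-- ===== LEMMAS AND PROOFS =====
theorem bEmit_append_singleton (bs : List (List String)) (cur : List String) :
    bEmit (bs ++ [cur]) = if (bDict cur).size ≠ 0 then bEmit bs ++ [bDict cur] else bEmit bs := by
  simp [bEmit, List.foldl_append]

theorem bDict_append_singleton (cur : List String) (l : String) :
    bDict (cur ++ [l]) = bApply bMarkers (bDict cur) l := by
  simp [bDict, List.foldl_append]

theorem step_persistent (ds : List (PySem.Dict String String)) (d : PySem.Dict String String)
    (l : String) (h : PySem.Str.isIn "Persistent screen id:" l = true) :
    aStep (ds, d) l = ((if d.size ≠ 0 then ds ++ [d] else ds), bApply bMarkers PySem.Dict.empty l) := by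
  simp only [PySem.Str.isIn_eq] at h
  simp only [aStep, bApply, bMarkers, aSet, bSet, aVal, PySem.Str.isIn_eq, h, if_true]

theorem step_other (ds : List (PySem.Dict String String)) (d : PySem.Dict String String)
    (l : String) (h : PySem.Str.isIn "Persistent screen id:" l = false) :
    aStep (ds, d) l = (ds, bApply bMarkers d l) := by
  simp only [PySem.Str.isIn_eq] at h
  simp only [aStep, bApply, bMarkers, aSet, bSet, aVal, PySem.Str.isIn_eq, h,
    Bool.false_eq_true, if_false]
  split_ifs <;> rfl

theorem inv (ls : List String) (bs : List (List String)) (cur : List String) :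
    ls.foldl aStep (bEmit bs, bDict cur)
      = (bEmit ((ls.foldl bSplitStep (bs, cur)).1 ),
         bDict ((ls.foldl bSplitStep (bs, cur)).2)) := by
  induction ls generalizing bs cur with
  | nil => rfl
  | cons l ls ih =>
    simp only [List.foldl_cons]
    by_cases h : PySem.Str.isIn "Persistent screen id:" l = true
    · rw [step_persistent _ _ _ h, ← bEmit_append_singleton]
      have hb : bSplitStep (bs, cur) l = (bs ++ [cur], [l]) := by
        simp only [bSplitStep, h, if_true]
      rw [hb]
      have hd : bApply bMarkers PySem.Dict.empty l = bDict [l] := rfl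
      rw [hd]; exact ih _ _
    · simp only [Bool.not_eq_true] at h
      rw [step_other _ _ _ h, ← bDict_append_singleton]
      have hb : bSplitStep (bs, cur) l = (bs, cur ++ [l]) := by
        simp only [bSplitStep, h, Bool.false_eq_true, if_false]
      rw [hb]; exact ih _ _

-- ===== VERDICT =====
theorem parse_displayplacer_output_spec : Claim_equal_parse_displayplacer_output := by
  intro result _ _
  unfold Spec_parse_displayplacer_output parse_displayplacer_output parse_displayplacer_output_alt
  have h0 : (([], PySem.Dict.empty) : List (PySem.Dict String String) × PySem.Dict String String)
      = (bEmit [], bDict []) := rfl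
  rw [h0, inv]
  unfold aFinish bBlocks
  rw [← bEmit_append_singleton]
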